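-- pv_equiv track=rewrite | github.com/magenta-aps/osdatascanner | src/os2datascanner/engine2/model/derived/mail.py | sanitise_path
-- ===== SOURCE A (Python) =====
-- def sanitise_path(p: str) -> str:
--     """Sanitises the path value associated with a MailPartHandle, which should
--     consist of one or more indexed steps on a MIME tree walk followed by an
--     optional filename. (The return value will definitely consist of that.)"""
--     out = []
--     components = p.lstrip("/").split("/")
--     while components:
--         head, tail = components[0], components[1:]
--         try:
--             int(head)
--             # OK, this path component is a valid integer, and so is presumably
--             # part of our MIME tree walk. Preserve it and move on
--             out.append(head)
--         except ValueError:
--             # We've met a path component that isn't part of the walk. At this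
--             # point we bail out: the last remaining component is a filename and
--             # everything else is irrelevant
--             filename = components[-1]
--             out.append(filename)
--             break
--         components = tail
--     return "/".join(out)
-- ===== SOURCE B (Python) =====
-- def _is_int(s: str) -> bool:
--     try:
--         int(s)
--         return True
--     except ValueError:
--         return False
--
--
-- def sanitise_path(p: str) -> str:
--     """Two-phase rewrite: first locate the first non-integer component, then
--     assemble the result by slicing (no incremental accumulator loop)."""
--     components = p.lstrip("/").split("/")
--     i = next((k for k, c in enumerate(components) if not _is_int(c)), None)
--     if i is None:
--         return "/".join(components)
--     return "/".join(components[:i] + [components[-1]])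
-- ===== Notes on version B (the rewrite author's own statement) =====
-- stated objective: alternative
-- what changed: Replaces A's while-loop with an accumulator and in-loop break by a two-phase decomposition: first find the index of the first non-integer component, then assemble the result by slicing (components[:i] + [components[-1]]) or joining the whole list.
import Mathlib
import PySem

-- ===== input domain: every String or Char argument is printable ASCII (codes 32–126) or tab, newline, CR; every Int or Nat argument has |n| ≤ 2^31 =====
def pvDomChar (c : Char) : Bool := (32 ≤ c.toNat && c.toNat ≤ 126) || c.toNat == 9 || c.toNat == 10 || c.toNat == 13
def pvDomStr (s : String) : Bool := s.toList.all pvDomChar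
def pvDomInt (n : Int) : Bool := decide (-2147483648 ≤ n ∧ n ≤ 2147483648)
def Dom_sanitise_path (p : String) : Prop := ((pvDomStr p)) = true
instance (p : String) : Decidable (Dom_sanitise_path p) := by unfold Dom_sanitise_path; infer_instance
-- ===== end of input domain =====

-- B changes the decomposition: a two-phase find-first-non-integer-index + slice
-- assembly instead of A's accumulator while-loop with an in-loop break
-- (objective: alternative, same cost).

-- ===== PORT A =====
-- the while-loop of A: components / out as lists of code-point lists;
-- 'int(head)' succeeding = PySem.Int.ofChars? head = some _
def saLoop (components : List (List Char)) (out : List (List Char)) :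
    List (List Char) :=
  match components with
  | [] => out
  | head :: tail =>
    match PySem.Int.ofChars? head with
    | some _ => saLoop tail (out ++ [head])
    | none =>
      -- components[-1]: components is head :: tail, hence nonempty
      out ++ [(head :: tail).getLast (by simp)]

def sanitise_path (p : String) : String :=
  -- p.lstrip("/") ported by hand as dropWhile (· == '/'): exact, the strip
  -- set is the single character '/'
  let components := PySem.Chars.splitOn (p.toList.dropWhile (· == '/')) ['/']
  String.ofList (PySem.Chars.join ['/'] (saLoop components []))

-- ===== PORT B =====
def sanitise_path_alt (p : String) : String :=
  -- same hand-ported lstrip("/") and split("/") as datatypes; then the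
  -- two-phase assembly of Source B: index of first non-integer, then slicing
  let components := PySem.Chars.splitOn (p.toList.dropWhile (· == '/')) ['/']
  match components.findIdx? (fun c => (PySem.Int.ofChars? c).isNone) with
  | none => String.ofList (PySem.Chars.join ['/'] components)
  | some i =>
      String.ofList (PySem.Chars.join ['/']
        (components.take i ++ [components.getLast!]))

-- ===== PRECONDITION & SPEC =====
def Spec_sanitise_path (p : String) (out : String) : Prop := out = sanitise_path_alt p
instance (p : String) (out : String) : Decidable (Spec_sanitise_path p out) := by unfold Spec_sanitise_path; infer_instance

-- ===== CLAIM (what is proved, stated in full; the proofs are below) =====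
def Claim_equal_sanitise_path : Prop := ∀ (p : String), Dom_sanitise_path p → Spec_sanitise_path p (sanitise_path p)

-- ===== LEMMAS AND PROOFS =====

-- the B-side assembly as a function of the component list
def bRes (components : List (List Char)) : List (List Char) :=
  match components.findIdx? (fun c => (PySem.Int.ofChars? c).isNone) with
  | none => components
  | some i => components.take i ++ [components.getLast!]

theorem saLoop_eq_bRes (components : List (List Char)) :
    ∀ out, saLoop components out = out ++ bRes components := by
  induction components with
  | nil => intro out; simp [saLoop, bRes]
  | cons head tail ih =>
    intro out
    cases h : PySem.Int.ofChars? head with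
    | none =>
      simp [saLoop, h, bRes, List.findIdx?_cons,
        List.getLast?_eq_some_getLast]
    | some v =>
      have hpred : (fun c => (PySem.Int.ofChars? c).isNone) head = false := by
        simp [h]
      rw [saLoop]
      simp only [h]
      rw [ih]
      unfold bRes
      rw [List.findIdx?_cons]
      simp only [h, Option.isNone_some, if_neg (by simp : ¬ (false = true))]
      cases ht : tail.findIdx? (fun c => (PySem.Int.ofChars? c).isNone) with
      | none => simp
      | some i =>
        cases tail with
        | nil => simp [List.findIdx?, List.findIdx?.go] at ht
        | cons t ts => simp [List.getLast!]

-- ===== VERDICT (by name: the statement is the Claim_ definition above) =====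
theorem sanitise_path_spec : Claim_equal_sanitise_path := by
  intro p _
  unfold Spec_sanitise_path sanitise_path sanitise_path_alt
  simp only []
  rw [saLoop_eq_bRes, List.nil_append]
  unfold bRes
  cases h : (PySem.Chars.splitOn (p.toList.dropWhile (· == '/')) ['/']).findIdx?
      (fun c => (PySem.Int.ofChars? c).isNone) <;> simp
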